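-- pv_equiv track=rewrite | github.com/LanceisTaken/Machine-Learning-Mario-Levels | TOAD-GAN/generate.py | fix_lucky_blocks
-- ===== SOURCE A (Python) =====
-- from typing import Dict, List, Tuple
--
-- def fix_lucky_blocks(
--     tile_ids: List[List[int]],
--     stoi: Dict[str, int],
--     min_gap: int = 3,
-- ) -> List[List[int]]:
--     """Ensure vertical spacing between ``?`` (lucky) blocks in each column.
--
--     Big Mario is 2 blocks tall and needs room to jump, so there must be at
--     least *min_gap* empty rows between any two ``?`` blocks in the same
--     column.  When blocks are too close, the **upper** one is replaced with
--     sky so the lower (more reachable) block stays.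
--
--     The scan proceeds bottom-to-top so the lowest block — the easiest to
--     reach from the ground — is always kept.
--     """
--     LUCKY = stoi.get("?")
--     SKY = stoi.get("-")
--     if LUCKY is None or SKY is None:
--         return tile_ids  # vocab missing expected tokens – skip silently
--
--     rows = len(tile_ids)
--     cols = len(tile_ids[0]) if rows else 0
--
--     for c in range(cols):
--         # Collect lucky-block row indices bottom-to-top
--         lucky_rows = [r for r in range(rows - 1, -1, -1)
--                       if tile_ids[r][c] == LUCKY]
--
--         if len(lucky_rows) < 2:
--             continue  # 0 or 1 block – nothing to fix
--
--         # Walk bottom-to-top; keep the first (lowest), check gap for rest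
--         last_kept = lucky_rows[0]
--         for r in lucky_rows[1:]:
--             gap = last_kept - r - 1  # empty rows between r and last_kept
--             if gap >= min_gap:
--                 last_kept = r  # sufficient room – keep this one too
--             else:
--                 tile_ids[r][c] = SKY  # too close – remove upper block
--
--     return tile_ids
-- ===== SOURCE B (Python) =====
-- def _rightmost_le(xs, x, hi):
--     """Largest index j < hi with xs[j] <= x (xs sorted ascending), or -1."""
--     lo, h = 0, hi
--     while lo < h:
--         mid = (lo + h) // 2
--         if xs[mid] <= x:
--             lo = mid + 1
--         else:
--             h = mid
--     return lo - 1
--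
-- def fix_lucky_blocks(tile_ids, stoi, min_gap=3):
--     """Binary-search jumps over each column's sorted lucky-row list.
--
--     Per column, collect the lucky rows ascending once; starting from the
--     lowest block, binary-search for the next block far enough above and doom
--     the whole slice in between without testing its elements one by one.
--     (Mutates tile_ids in place, like the original.)
--     """
--     if "?" not in stoi or "-" not in stoi:
--         return tile_ids
--     LUCKY, SKY = stoi["?"], stoi["-"]
--     rows = len(tile_ids)
--     cols = len(tile_ids[0]) if rows else 0
--     for c in range(cols):
--         lucky = [r for r in range(rows) if tile_ids[r][c] == LUCKY]
--         i = len(lucky) - 1  # index of the lowest block: always kept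
--         while i > 0:
--             j = _rightmost_le(lucky, lucky[i] - min_gap - 1, i)
--             for r in lucky[j + 1:i]:  # too close to lucky[i]: doom the slice
--                 tile_ids[r][c] = SKY
--             if j < 0:
--                 break
--             i = j
--     return tile_ids
-- ===== Notes on version B (the rewrite author's own statement) =====
-- stated objective: alternative
-- what changed: A walks every lucky block of a column bottom-to-top testing each gap; B collects the column's lucky rows sorted ascending and jumps with a hand-written binary search to the next block far enough above, dooming the whole in-between slice without testing its elements.
import Mathlib
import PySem

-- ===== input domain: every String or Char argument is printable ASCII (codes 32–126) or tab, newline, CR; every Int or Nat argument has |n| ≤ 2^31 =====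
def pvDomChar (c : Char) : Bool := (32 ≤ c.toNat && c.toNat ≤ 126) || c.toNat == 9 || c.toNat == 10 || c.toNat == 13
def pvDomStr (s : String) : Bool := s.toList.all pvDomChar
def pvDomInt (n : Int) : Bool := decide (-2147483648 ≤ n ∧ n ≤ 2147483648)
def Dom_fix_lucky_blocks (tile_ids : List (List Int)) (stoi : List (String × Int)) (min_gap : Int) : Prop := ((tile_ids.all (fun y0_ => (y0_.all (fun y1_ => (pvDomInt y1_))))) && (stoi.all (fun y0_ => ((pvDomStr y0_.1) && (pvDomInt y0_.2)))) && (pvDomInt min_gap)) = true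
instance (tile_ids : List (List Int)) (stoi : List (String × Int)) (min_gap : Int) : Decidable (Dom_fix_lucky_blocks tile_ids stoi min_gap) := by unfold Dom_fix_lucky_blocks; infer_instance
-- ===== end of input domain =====

-- B replaces A's per-column linear greedy scan (walk every lucky block bottom-to-top, testing
-- each gap) by binary-search jumps: collect the column's lucky rows sorted ascending once, and
-- from the lowest block repeatedly binary-search the next block far enough above, dooming the
-- whole in-between slice without testing its elements. Objective: alternative (same cost).
-- Both A and B mutate tile_ids in place in Python; the equivalence proved is about the return value.

-- ===== PORT A =====
-- g[r][c] read and write; the defaults are only reached where Python raises IndexError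
-- (excluded by Pre_); indices here are always ≥ 0, so .toNat is exact.
def pvCell (g : List (List Int)) (r c : Int) : Int :=
  PySem.List.pyGetD (PySem.List.pyGetD g r []) c 0

def pvSetCell (g : List (List Int)) (r c v : Int) : List (List Int) :=
  g.set r.toNat ((g.getD r.toNat []).set c.toNat v)

def fix_lucky_blocks (tile_ids : List (List Int)) (stoi : List (String × Int)) (min_gap : Int) : List (List Int) :=
  match PySem.Dict.get? (PySem.Dict.ofList stoi) "?", PySem.Dict.get? (PySem.Dict.ofList stoi) "-" with
  | some LUCKY, some SKY =>
    let rows : Int := tile_ids.length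
    let cols : Int := if rows = 0 then 0 else ((tile_ids.headD []).length : Int)
    (PySem.List.pyRange 0 cols 1).foldl (fun g c =>
      -- lucky_rows = [r for r in range(rows-1, -1, -1) if tile_ids[r][c] == LUCKY]
      let lucky_rows := (PySem.List.pyRange (rows - 1) (-1) (-1)).filter
        (fun r => pvCell g r c == LUCKY)
      if lucky_rows.length < 2 then g
      else
        match lucky_rows with
        | [] => g
        | r0 :: rest =>
          (rest.foldl (fun (st : Int × List (List Int)) r =>
              if st.1 - r - 1 ≥ min_gap then (r, st.2)
              else (st.1, pvSetCell st.2 r c SKY)) (r0, g)).2) tile_ids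
  | _, _ => tile_ids

-- ===== PORT B =====
-- _rightmost_le's while loop (lo and h are Python ints that stay ≥ 0; xs[mid] is always
-- in range at B's call sites, so the pyGetD default is unreachable there)
def bisLoop (xs : List Int) (x : Int) : Nat → Nat → Nat → Nat
  | 0, lo, _ => lo
  | fuel + 1, lo, h =>
    if lo < h then
      let mid := (lo + h) / 2
      if PySem.List.pyGetD xs (mid : Int) 0 ≤ x then bisLoop xs x fuel (mid + 1) h
      else bisLoop xs x fuel lo mid
    else lo

def rightmostLe (xs : List Int) (x : Int) (hi : Nat) : Int :=
  (bisLoop xs x hi 0 hi : Int) - 1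

-- the 'while i > 0' loop of B's column pass (fuel = i.toNat bounds the iteration count,
-- since the index strictly decreases; with fuel 0 we have i ≤ 0 and the loop body is skipped)
def jumpLoopF (L : List Int) (mg c SK : Int) : Nat → List (List Int) → Int → List (List Int)
  | 0, g, _ => g
  | fuel + 1, g, i =>
    if 0 < i then
      let j := rightmostLe L (PySem.List.pyGetD L i 0 - mg - 1) i.toNat
      let g' := (PySem.List.slice L (some (j + 1)) (some i)).foldl
        (fun g r => pvSetCell g r c SK) g
      if j < 0 then g' else jumpLoopF L mg c SK fuel g' j
    else g

def jumpLoop (L : List Int) (mg c SK : Int) (g : List (List Int)) (i : Int) : List (List Int) :=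
  jumpLoopF L mg c SK i.toNat g i

def fix_lucky_blocks_alt (tile_ids : List (List Int)) (stoi : List (String × Int)) (min_gap : Int) : List (List Int) :=
  if !(PySem.Dict.contains (PySem.Dict.ofList stoi) "?") || !(PySem.Dict.contains (PySem.Dict.ofList stoi) "-") then tile_ids
  else
    let LUCKY := (PySem.Dict.get? (PySem.Dict.ofList stoi) "?").getD 0
    let SKY := (PySem.Dict.get? (PySem.Dict.ofList stoi) "-").getD 0
    let rows : Int := tile_ids.length
    let cols : Int := if rows = 0 then 0 else ((tile_ids.headD []).length : Int)
    (PySem.List.pyRange 0 cols 1).foldl (fun g c =>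
      -- lucky = [r for r in range(rows) if tile_ids[r][c] == LUCKY] (ascending)
      let lucky := (PySem.List.pyRange 0 rows 1).filter (fun r => pvCell g r c == LUCKY)
      jumpLoop lucky min_gap c SKY g ((lucky.length : Int) - 1)) tile_ids

-- ===== PRECONDITION & SPEC =====
-- Pre_ excludes exactly the inputs where the Python raises IndexError: when both vocab
-- tokens are present, every row must be at least as long as the first row (both versions
-- index every row at each column of row 0).
def Pre_fix_lucky_blocks (tile_ids : List (List Int)) (stoi : List (String × Int)) (min_gap : Int) : Prop :=
  (PySem.Dict.get? (PySem.Dict.ofList stoi) "?").isSome ∧ (PySem.Dict.get? (PySem.Dict.ofList stoi) "-").isSome →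
    ∀ row ∈ tile_ids, (tile_ids.headD []).length ≤ row.length
instance (tile_ids : List (List Int)) (stoi : List (String × Int)) (min_gap : Int) : Decidable (Pre_fix_lucky_blocks tile_ids stoi min_gap) := by unfold Pre_fix_lucky_blocks; infer_instance

def pvWitness_fix_lucky_blocks : List (List Int) × (List (String × Int)) × Int :=
  ([[1, 0], [1, 0], [1, 1]], [("?", 1), ("-", 0)], 1)

def Spec_fix_lucky_blocks (tile_ids : List (List Int)) (stoi : List (String × Int)) (min_gap : Int) (out : List (List Int)) : Prop := out = fix_lucky_blocks_alt tile_ids stoi min_gap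
instance (tile_ids : List (List Int)) (stoi : List (String × Int)) (min_gap : Int) (out : List (List Int)) : Decidable (Spec_fix_lucky_blocks tile_ids stoi min_gap out) := by unfold Spec_fix_lucky_blocks; infer_instance

-- ===== CLAIM (what is proved, stated in full; the proofs are below) =====
def Claim_equal_fix_lucky_blocks : Prop := ∀ (tile_ids : List (List Int)) (stoi : List (String × Int)) (min_gap : Int), Dom_fix_lucky_blocks tile_ids stoi min_gap → Pre_fix_lucky_blocks tile_ids stoi min_gap → Spec_fix_lucky_blocks tile_ids stoi min_gap (fix_lucky_blocks tile_ids stoi min_gap)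

-- ===== LEMMAS AND PROOFS =====

-- bound on the binary-search result (used for jdl's termination and the jump bound)
theorem bisLoop_le (xs : List Int) (x : Int) : ∀ (n lo h : Nat), h - lo ≤ n → lo ≤ h →
    bisLoop xs x n lo h ≤ h := by
  intro n
  induction n with
  | zero =>
    intro lo h h1 h2
    simp only [bisLoop]
    omega
  | succ n ih =>
    intro lo h h1 h2
    simp only [bisLoop]
    by_cases hlh : lo < h
    · rw [if_pos hlh]
      split
      · exact ih _ _ (by omega) (by omega)
      · exact le_trans (ih _ _ (by omega) (by omega)) (by omega)
    · rw [if_neg hlh]; omega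


-- ---- basic grid lemmas ----
def cellN (g : List (List Int)) (rN cN : Nat) : Int := (g.getD rN []).getD cN 0

lemma length_pvSetCell (g : List (List Int)) (r c v : Int) :
    (pvSetCell g r c v).length = g.length := by simp [pvSetCell]

lemma getD_pvSetCell (g : List (List Int)) (r c v : Int) (i : Nat) :
    (pvSetCell g r c v).getD i [] =
      if i = r.toNat ∧ i < g.length then (g.getD i []).set c.toNat v else g.getD i [] := by
  unfold pvSetCell
  by_cases h : r.toNat = i
  · subst h
    by_cases hl : r.toNat < g.length
    · simp [List.getD_eq_getElem?_getD, List.getElem?_set, hl]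
    · simp [List.getD_eq_getElem?_getD, List.getElem?_set, hl]
  · simp [List.getD_eq_getElem?_getD, List.getElem?_set, h, Ne.symm h]

lemma rowlen_pvSetCell (g : List (List Int)) (r c v : Int) (i : Nat) :
    ((pvSetCell g r c v).getD i []).length = (g.getD i []).length := by
  rw [getD_pvSetCell]; split <;> simp

lemma cellN_pvSetCell (g : List (List Int)) (rN cN : Nat) (v : Int) (r' c' : Nat)
    (hr : rN < g.length) (hc : cN < (g.getD rN []).length) :
    cellN (pvSetCell g (rN : Int) (cN : Int) v) r' c' =
      if r' = rN ∧ c' = cN then v else cellN g r' c' := by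
  unfold cellN
  rw [getD_pvSetCell]
  simp only [Int.toNat_natCast]
  by_cases h1 : r' = rN
  · subst h1
    simp only [hr, and_true, if_pos rfl, true_and]
    by_cases h2 : c' = cN
    · subst h2
      have hc' : c' < (g[r']?.getD []).length := by
        rwa [List.getD_eq_getElem?_getD] at hc
      simp [List.getD_eq_getElem?_getD, List.getElem?_set, hc']
    · simp [List.getD_eq_getElem?_getD, List.getElem?_set, h2, Ne.symm h2]
  · simp [h1]

lemma grid_ext (g1 g2 : List (List Int)) (hlen : g1.length = g2.length)
    (hrow : ∀ i : Nat, (g1.getD i []).length = (g2.getD i []).length)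
    (hcell : ∀ rN cN : Nat, cellN g1 rN cN = cellN g2 rN cN) : g1 = g2 := by
  apply List.ext_getElem hlen
  intro i h1 h2
  apply List.ext_getElem
  · have := hrow i
    rwa [List.getD_eq_getElem _ _ h1, List.getD_eq_getElem _ _ h2] at this
  · intro j hj1 hj2
    have := hcell i j
    unfold cellN at this
    rwa [List.getD_eq_getElem _ _ h1, List.getD_eq_getElem _ _ h2,
      List.getD_eq_getElem _ _ hj1, List.getD_eq_getElem _ _ hj2] at this

lemma rowlen_t (t : List (List Int)) (hPre : ∀ row ∈ t, (t.headD []).length ≤ row.length)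
    (i : Nat) (hi : i < t.length) :
    (t.headD []).length ≤ (t.getD i []).length := by
  rw [List.getD_eq_getElem _ _ hi]
  exact hPre _ (List.getElem_mem hi)

-- ---- the doomed rows of A's greedy walk, on the (descending, all-lucky) list ----
def deadF (mg : Int) : Option Int → List Int → List Int
  | _, [] => []
  | none, r :: rs => deadF mg (some r) rs
  | some lk, r :: rs =>
    if lk - r - 1 ≥ mg then deadF mg (some r) rs else r :: deadF mg (some lk) rs

lemma mem_of_mem_deadF (mg : Int) :
    ∀ (D : List Int) (last : Option Int) (x : Int), x ∈ deadF mg last D → x ∈ D := by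
  intro D
  induction D with
  | nil => intro last x h; cases last <;> exact absurd h (by simp [deadF])
  | cons r rs ih =>
    intro last x h
    cases last with
    | none => exact List.mem_cons_of_mem _ (ih _ _ h)
    | some lk =>
      simp only [deadF] at h
      split at h
      · exact List.mem_cons_of_mem _ (ih _ _ h)
      · rcases List.mem_cons.1 h with h | h
        · simp [h]
        · exact List.mem_cons_of_mem _ (ih _ _ h)

-- structure of deadF on a maximal too-close prefix
lemma deadF_some (mg lk : Int) :
    ∀ (D : List Int), deadF mg (some lk) D =
      D.takeWhile (fun r => !decide (lk - r - 1 ≥ mg)) ++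
      (match D.dropWhile (fun r => !decide (lk - r - 1 ≥ mg)) with
       | [] => [] | r :: rs => deadF mg (some r) rs) := by
  intro D
  induction D with
  | nil => rfl
  | cons r rs ih =>
    by_cases hgap : lk - r - 1 ≥ mg
    · simp only [deadF, List.takeWhile_cons, List.dropWhile_cons, hgap, decide_true,
        Bool.not_true, if_pos hgap]
      simp
    · simp only [deadF, List.takeWhile_cons, List.dropWhile_cons, hgap, decide_false,
        Bool.not_false, if_neg hgap]
      simp only [if_true]
      rw [ih]
      simp

lemma takeWhile_dropWhile_append {α : Type} (p : α → Bool) :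
    ∀ (l1 l2 : List α), (∀ x ∈ l1, p x = true) → (∀ y, l2.head? = some y → p y = false) →
      (l1 ++ l2).takeWhile p = l1 ∧ (l1 ++ l2).dropWhile p = l2 := by
  intro l1
  induction l1 with
  | nil =>
    intro l2 _ h2
    cases l2 with
    | nil => simp
    | cons y t =>
      have := h2 y rfl
      simp [List.takeWhile_cons, List.dropWhile_cons, this]
  | cons a l1 ih =>
    intro l2 h1 h2
    have ha := h1 a (by simp)
    obtain ⟨e1, e2⟩ := ih l2 (fun x hx => h1 x (by simp [hx])) h2
    simp [List.takeWhile_cons, List.dropWhile_cons, ha, e1, e2]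

-- ---- A's inner loop writes exactly deadF ----
def writeCol (c SK : Int) (D : List Int) (g : List (List Int)) : List (List Int) :=
  D.foldl (fun g r => pvSetCell g r c SK) g

lemma A_fold (mg c SK : Int) :
    ∀ (rest : List Int) (lk : Int) (g : List (List Int)),
      (rest.foldl (fun (st : Int × List (List Int)) r =>
          if st.1 - r - 1 ≥ mg then (r, st.2) else (st.1, pvSetCell st.2 r c SK)) (lk, g)).2
        = writeCol c SK (deadF mg (some lk) rest) g := by
  intro rest
  induction rest with
  | nil => intro lk g; rfl
  | cons r rs ih =>
    intro lk g
    simp only [List.foldl_cons, deadF]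
    by_cases hg : lk - r - 1 ≥ mg
    · rw [if_pos hg, if_pos hg]; exact ih r g
    · rw [if_neg hg, if_neg hg]
      show (rs.foldl _ (lk, pvSetCell g r c SK)).2 = writeCol c SK (r :: deadF mg (some lk) rs) g
      rw [ih lk (pvSetCell g r c SK)]; rfl

lemma writeCol_append (c SK : Int) (D1 D2 : List Int) (g : List (List Int)) :
    writeCol c SK (D1 ++ D2) g = writeCol c SK D2 (writeCol c SK D1 g) := by
  simp [writeCol, List.foldl_append]

lemma length_writeCol (c SK : Int) :
    ∀ (D : List Int) (g : List (List Int)), (writeCol c SK D g).length = g.length := by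
  intro D
  induction D with
  | nil => intro g; rfl
  | cons r rs ih => intro g; show (writeCol c SK rs (pvSetCell g r c SK)).length = _
                    rw [ih, length_pvSetCell]

lemma rowlen_writeCol (c SK : Int) :
    ∀ (D : List Int) (g : List (List Int)) (i : Nat),
      ((writeCol c SK D g).getD i []).length = ((g.getD i []).length) := by
  intro D
  induction D with
  | nil => intro g i; rfl
  | cons r rs ih => intro g i
                    show ((writeCol c SK rs (pvSetCell g r c SK)).getD i []).length = _
                    rw [ih, rowlen_pvSetCell]

lemma writeCol_cells (cN : Nat) (SK : Int) :
    ∀ (D : List Int) (g : List (List Int)),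
      (∀ r ∈ D, 0 ≤ r ∧ r.toNat < g.length ∧ cN < (g.getD r.toNat []).length) →
      ∀ (rN c' : Nat), cellN (writeCol (cN : Int) SK D g) rN c' =
        if (rN : Int) ∈ D ∧ c' = cN then SK else cellN g rN c' := by
  intro D
  induction D with
  | nil => intro g _ rN c'; simp [writeCol]
  | cons r rs ih =>
    intro g hD rN c'
    obtain ⟨hr0, hrl, hcl⟩ := hD r (by simp)
    have hrcast : r = ((r.toNat : Nat) : Int) := (Int.toNat_of_nonneg hr0).symm
    have hg1 : cellN (pvSetCell g r (cN : Int) SK) rN c' =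
        if rN = r.toNat ∧ c' = cN then SK else cellN g rN c' := by
      rw [hrcast]; exact cellN_pvSetCell g r.toNat cN SK rN c' hrl hcl
    have step : writeCol (cN : Int) SK (r :: rs) g
        = writeCol (cN : Int) SK rs (pvSetCell g r (cN : Int) SK) := rfl
    rw [step, ih (pvSetCell g r (cN : Int) SK) ?hrs rN c']
    case hrs =>
      intro x hx
      obtain ⟨h0, h1, h2⟩ := hD x (by simp [hx])
      exact ⟨h0, by rwa [length_pvSetCell], by rwa [rowlen_pvSetCell]⟩
    rw [hg1]
    by_cases hc : c' = cN
    · by_cases he : rN = r.toNat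
      · have hmem : ((rN : Nat) : Int) ∈ r :: rs := by
          rw [List.mem_cons]; left; rw [he, ← hrcast]
        by_cases hm : ((rN : Nat) : Int) ∈ rs
        · rw [if_pos ⟨hm, hc⟩, if_pos ⟨hmem, hc⟩]
        · rw [if_neg (by tauto), if_pos ⟨he, hc⟩, if_pos ⟨hmem, hc⟩]
      · have hne : ((rN : Nat) : Int) ≠ r := by
          rw [hrcast]; exact_mod_cast he
        by_cases hm : ((rN : Nat) : Int) ∈ rs
        · rw [if_pos ⟨hm, hc⟩, if_pos ⟨List.mem_cons_of_mem _ hm, hc⟩]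
        · have hnm : ((rN : Nat) : Int) ∉ r :: rs := by
            rw [List.mem_cons]; tauto
          rw [if_neg (by tauto), if_neg (by tauto), if_neg (by tauto)]
    · simp [hc]

lemma writeCol_congr (c : Int) (hc : 0 ≤ c) (SK : Int) (D1 D2 : List Int) (g : List (List Int))
    (hmem : ∀ x, x ∈ D1 ↔ x ∈ D2)
    (hB : ∀ r ∈ D1, 0 ≤ r ∧ r.toNat < g.length ∧ c.toNat < (g.getD r.toNat []).length) :
    writeCol c SK D1 g = writeCol c SK D2 g := by
  have hcc : c = ((c.toNat : Nat) : Int) := (Int.toNat_of_nonneg hc).symm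
  rw [hcc]
  apply grid_ext
  · rw [length_writeCol, length_writeCol]
  · intro i; rw [rowlen_writeCol, rowlen_writeCol]
  · intro rN cN
    rw [writeCol_cells c.toNat SK D1 g hB rN cN,
      writeCol_cells c.toNat SK D2 g (fun r hr => hB r ((hmem r).2 hr)) rN cN]
    by_cases h : (rN : Int) ∈ D1
    · by_cases h2 : cN = c.toNat
      · rw [if_pos ⟨h, h2⟩, if_pos ⟨(hmem _).1 h, h2⟩]
      · rw [if_neg (by tauto), if_neg (by tauto)]
    · rw [if_neg (by tauto), if_neg (fun hh => h ((hmem _).2 hh.1))]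

-- ---- binary-search correctness ----
lemma bisLoop_spec (L : List Int) (x : Int)
    (hs : ∀ k1 k2 : Nat, k1 < k2 → k2 < L.length → L.getD k1 0 < L.getD k2 0)
    (hiTop : Nat) (hTopLen : hiTop ≤ L.length) :
    ∀ (n lo h : Nat), h - lo ≤ n → lo ≤ h → h ≤ hiTop →
      (∀ k, k < lo → L.getD k 0 ≤ x) → (∀ k, h ≤ k → k < hiTop → x < L.getD k 0) →
      (∀ k, k < bisLoop L x n lo h → L.getD k 0 ≤ x) ∧
      (∀ k, bisLoop L x n lo h ≤ k → k < hiTop → x < L.getD k 0) ∧ bisLoop L x n lo h ≤ h := by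
  intro n
  induction n with
  | zero =>
    intro lo h h1 h2 h3 hlo hhi
    simp only [bisLoop]
    exact ⟨hlo, fun k hk1 hk2 => hhi k (by omega) hk2, le_refl _ |>.trans (by omega)⟩
  | succ n ih =>
    intro lo h h1 h2 h3 hlo hhi
    simp only [bisLoop]
    by_cases hlh : lo < h
    · rw [if_pos hlh]
      rw [PySem.List.pyGetD_natCast]
      split
      · next hmid =>
        have hres := ih ((lo + h) / 2 + 1) h (by omega) (by omega) h3
          (fun k hk => by
            rcases Nat.lt_succ_iff_lt_or_eq.1 hk with hk | hk
            · exact le_of_lt (lt_of_lt_of_le (hs k ((lo + h) / 2) hk (by omega)) hmid)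
            · exact hk ▸ hmid) hhi
        exact ⟨hres.1, hres.2.1, hres.2.2.trans (le_refl h)⟩
      · next hmid =>
        push_neg at hmid
        have hres := ih lo ((lo + h) / 2) (by omega) (by omega) (by omega) hlo
          (fun k hk1 hk2 => by
            by_cases hkh : k < h
            · rcases Nat.eq_or_lt_of_le hk1 with hk | hk
              · exact hk ▸ hmid
              · exact lt_trans hmid (hs _ _ hk (by omega))
            · exact hhi k (by omega) hk2)
        exact ⟨hres.1, hres.2.1, hres.2.2.trans (by omega)⟩
    · rw [if_neg hlh]
      exact ⟨hlo, fun k hk1 hk2 => hhi k (by omega) hk2, le_refl lo |>.trans (by omega)⟩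

-- ---- the doomed rows of B's jump loop, as a list ----
def jdl (L : List Int) (mg : Int) (i : Int) : List Int :=
  if 0 < i then
    PySem.List.slice L (some (rightmostLe L (PySem.List.pyGetD L i 0 - mg - 1) i.toNat + 1)) (some i)
      ++ jdl L mg (rightmostLe L (PySem.List.pyGetD L i 0 - mg - 1) i.toNat)
  else []
termination_by i.toNat
decreasing_by
  have hb := bisLoop_le L (PySem.List.pyGetD L i 0 - mg - 1) i.toNat 0 i.toNat (by omega) (by omega)
  simp only [rightmostLe] at *
  omega

lemma jumpLoopF_eq (L : List Int) (mg c SK : Int) :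
    ∀ (n : Nat) (i : Int), i.toNat ≤ n → ∀ g,
      jumpLoopF L mg c SK n g i = writeCol c SK (jdl L mg i) g := by
  intro n
  induction n with
  | zero =>
    intro i hn g
    simp only [jumpLoopF]
    rw [jdl, if_neg (by omega)]
    rfl
  | succ n ih =>
    intro i hn g
    simp only [jumpLoopF]
    by_cases hpos : 0 < i
    · rw [jdl, if_pos hpos, if_pos hpos]
      set j := rightmostLe L (PySem.List.pyGetD L i 0 - mg - 1) i.toNat with hj
      have hb := bisLoop_le L (PySem.List.pyGetD L i 0 - mg - 1) i.toNat 0 i.toNat (by omega) (by omega)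
      have hjlt : j.toNat < i.toNat := by simp only [hj, rightmostLe]; omega
      by_cases hneg : j < 0
      · rw [if_pos hneg, writeCol_append]
        have : jdl L mg j = [] := by rw [jdl, if_neg (by omega)]
        rw [this]
        rfl
      · rw [if_neg hneg, writeCol_append]
        exact ih j (by omega) _
    · rw [jdl, if_neg hpos, if_neg hpos]
      rfl

lemma jumpLoop_eq (L : List Int) (mg c SK : Int) (i : Int) (g : List (List Int)) :
    jumpLoop L mg c SK g i = writeCol c SK (jdl L mg i) g :=
  jumpLoopF_eq L mg c SK i.toNat i le_rfl g

-- helpers to reason about slice members by index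
lemma mem_drop_take (L : List Int) (m i : Nat) (x : Int) (hx : x ∈ (L.drop m).take (i - m)) :
    ∃ k, m ≤ k ∧ k < i ∧ k < L.length ∧ L.getD k 0 = x := by
  obtain ⟨k', hk', he⟩ := List.getElem_of_mem hx
  have hlen := hk'
  rw [List.length_take, List.length_drop] at hlen
  have hk'2 : k' < i - m := by omega
  have hk'3 : m + k' < L.length := by omega
  refine ⟨m + k', by omega, by omega, hk'3, ?_⟩
  rw [List.getD_eq_getElem _ _ hk'3]
  rw [List.getElem_take, List.getElem_drop] at he
  exact he

-- ---- the central membership lemma: jump-doomed = greedy-doomed ----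
lemma mem_jdl (L : List Int) (mg : Int) (hp : L.Pairwise (· < ·)) :
    ∀ (n : Nat) (i : Int), i.toNat ≤ n → 0 < i → i < (L.length : Int) →
      ∀ x, (x ∈ jdl L mg i ↔
        x ∈ deadF mg (some (L.getD i.toNat 0)) ((L.take i.toNat).reverse)) := by
  intro n
  induction n with
  | zero => intro i h0 hpos _ _; exact absurd h0 (by omega)
  | succ n ih =>
    intro i hn hpos hlen x
    have hiN : i = ((i.toNat : Nat) : Int) := (Int.toNat_of_nonneg (le_of_lt hpos)).symm
    have hiNlen : i.toNat < L.length := by omega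
    have hs : ∀ k1 k2 : Nat, k1 < k2 → k2 < L.length → L.getD k1 0 < L.getD k2 0 := by
      intro k1 k2 h12 h2
      rw [List.getD_eq_getElem _ _ (by omega), List.getD_eq_getElem _ _ h2]
      exact List.pairwise_iff_getElem.1 hp k1 k2 (by omega) h2 h12
    have hLi : PySem.List.pyGetD L i 0 = L.getD i.toNat 0 := by
      conv_lhs => rw [hiN]
      rw [PySem.List.pyGetD_natCast]
    set thr := L.getD i.toNat 0 - mg - 1 with hthr
    set m := bisLoop L thr i.toNat 0 i.toNat with hmdef
    obtain ⟨s1, s2, s3⟩ := bisLoop_spec L thr hs i.toNat (by omega) i.toNat 0 i.toNat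
      (by omega) (by omega) (le_refl _)
      (fun k hk => absurd hk (Nat.not_lt_zero k))
      (fun k hk1 hk2 => absurd (lt_of_le_of_lt hk1 hk2) (lt_irrefl _))
    rw [jdl, if_pos hpos]
    have hrm : rightmostLe L (PySem.List.pyGetD L i 0 - mg - 1) i.toNat = (m : Int) - 1 := by
      rw [rightmostLe, hLi, ← hthr, ← hmdef]
    rw [hrm]
    have hslice : PySem.List.slice L (some ((m : Int) - 1 + 1)) (some i)
        = (L.drop m).take (i.toNat - m) := by
      have he : (m : Int) - 1 + 1 = (m : Int) := by ring
      rw [he]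
      conv_lhs => rw [hiN]
      rw [PySem.List.slice_natCast]
    rw [hslice]
    have hpiff : ∀ r : Int, (!decide (L.getD i.toNat 0 - r - 1 ≥ mg)) = true ↔ thr < r := by
      intro r
      simp only [Bool.not_eq_true', decide_eq_false_iff_not, not_le, hthr]
      omega
    have htake : L.take i.toNat = L.take m ++ (L.drop m).take (i.toNat - m) := by
      conv_lhs => rw [show i.toNat = m + (i.toNat - m) by omega]
      rw [List.take_add]
    by_cases hm0 : m = 0
    · have hjdl0 : jdl L mg ((m : Int) - 1) = [] := by rw [jdl, if_neg (by omega)]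
      rw [hjdl0, List.append_nil]
      have hall : ∀ y ∈ (L.take i.toNat).reverse,
          (fun r => !decide (L.getD i.toNat 0 - r - 1 ≥ mg)) y = true := by
        intro y hy
        rw [List.mem_reverse] at hy
        have hy2 : y ∈ (L.drop 0).take (i.toNat - 0) := by simpa using hy
        obtain ⟨k, _, hk2, _, hk4⟩ := mem_drop_take L 0 i.toNat y hy2
        exact (hpiff y).2 (hk4 ▸ s2 k (by omega) hk2)
      have hdF : deadF mg (some (L.getD i.toNat 0)) ((L.take i.toNat).reverse)
          = (L.take i.toNat).reverse := by
        obtain ⟨e1, e2⟩ := takeWhile_dropWhile_append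
          (fun r => !decide (L.getD i.toNat 0 - r - 1 ≥ mg))
          ((L.take i.toNat).reverse) [] hall (by simp)
        rw [List.append_nil] at e1 e2
        rw [deadF_some, e1, e2]
        simp
      rw [hdF, hm0]
      simp [List.mem_reverse]
    · have hm1 : m - 1 < L.length := by omega
      have hmle : m ≤ i.toNat := s3
      have hsucc : L.take m = L.take (m - 1) ++ [L.getD (m - 1) 0] := by
        conv_lhs => rw [show m = (m - 1) + 1 by omega]
        rw [List.take_add, List.drop_eq_getElem_cons hm1, List.getD_eq_getElem _ _ hm1]
        rfl
      have hdec : (L.take i.toNat).reverse =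
          ((L.drop m).take (i.toNat - m)).reverse ++ (L.getD (m - 1) 0 :: (L.take (m - 1)).reverse) := by
        rw [htake, List.reverse_append, hsucc, List.reverse_append]
        simp
      have hallslice : ∀ y ∈ ((L.drop m).take (i.toNat - m)).reverse,
          (fun r => !decide (L.getD i.toNat 0 - r - 1 ≥ mg)) y = true := by
        intro y hy
        rw [List.mem_reverse] at hy
        obtain ⟨k, hk1, hk2, _, hk4⟩ := mem_drop_take L m i.toNat y hy
        exact (hpiff y).2 (hk4 ▸ s2 k hk1 hk2)
      have hpm1 : (fun r => !decide (L.getD i.toNat 0 - r - 1 ≥ mg)) (L.getD (m - 1) 0) = false := by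
        have := s1 (m - 1) (by omega)
        simp only [Bool.not_eq_false', decide_eq_true_iff, hthr] at this ⊢
        omega
      obtain ⟨e1, e2⟩ := takeWhile_dropWhile_append
        (fun r => !decide (L.getD i.toNat 0 - r - 1 ≥ mg))
        (((L.drop m).take (i.toNat - m)).reverse) (L.getD (m - 1) 0 :: (L.take (m - 1)).reverse)
        hallslice (by intro y hy; rw [List.head?_cons] at hy; cases hy; exact hpm1)
      have hdF : deadF mg (some (L.getD i.toNat 0)) ((L.take i.toNat).reverse)
          = ((L.drop m).take (i.toNat - m)).reverse
            ++ deadF mg (some (L.getD (m - 1) 0)) ((L.take (m - 1)).reverse) := by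
        rw [hdec, deadF_some, e1, e2]
      rw [hdF]
      simp only [List.mem_append, List.mem_reverse]
      apply or_congr Iff.rfl
      by_cases hm1' : m = 1
      · rw [hm1']
        have h1 : jdl L mg ((1 : Nat) - 1) = [] := by rw [jdl]; norm_num
        rw [h1]
        simp [deadF]
      · have hrec := ih ((m : Int) - 1) (by omega) (by omega) (by omega) x
        have htn : ((m : Int) - 1).toNat = m - 1 := by omega
        rw [htn] at hrec
        exact hrec


-- ---- both versions as folds of column steps ----
lemma ds_eq (n : Nat) :
    PySem.List.pyRange ((n : Int) - 1) (-1) (-1) = (PySem.List.pyRange 0 (n : Int) 1).reverse := by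
  have h := PySem.List.pyRange_neg_one_eq_reverse ((n : Int) - 1) (-1)
  simpa using h

lemma cols_eq (t : List (List Int)) :
    (if (t.length : Int) = 0 then 0 else ((t.headD []).length : Int)) = ((t.headD []).length : Int) := by
  cases t with
  | nil => simp
  | cons h l => rw [if_neg (by simp only [List.length_cons]; intro hh; omega)]

def colStepA (LK SK mg rows : Int) (g : List (List Int)) (c : Int) : List (List Int) :=
  let lucky_rows := (PySem.List.pyRange (rows - 1) (-1) (-1)).filter
    (fun r => pvCell g r c == LK)
  if lucky_rows.length < 2 then g
  else
    match lucky_rows with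
    | [] => g
    | r0 :: rest =>
      (rest.foldl (fun (st : Int × List (List Int)) r =>
          if st.1 - r - 1 ≥ mg then (r, st.2)
          else (st.1, pvSetCell st.2 r c SK)) (r0, g)).2

def colStepB (LK SK mg rows : Int) (g : List (List Int)) (c : Int) : List (List Int) :=
  let lucky := (PySem.List.pyRange 0 rows 1).filter (fun r => pvCell g r c == LK)
  jumpLoop lucky mg c SK g ((lucky.length : Int) - 1)

lemma fixA_eq (t : List (List Int)) (stoi : List (String × Int)) (mg LK SK : Int)
    (hL : PySem.Dict.get? (PySem.Dict.ofList stoi) "?" = some LK)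
    (hS : PySem.Dict.get? (PySem.Dict.ofList stoi) "-" = some SK) :
    fix_lucky_blocks t stoi mg =
      (PySem.List.pyRange 0 ((t.headD []).length : Int) 1).foldl
        (colStepA LK SK mg (t.length : Int)) t := by
  unfold fix_lucky_blocks
  rw [hL, hS]
  simp only [cols_eq]
  rfl

lemma dict_contains_eq_isSome (d : PySem.Dict String Int) (k : String) :
    d.contains k = (d.get? k).isSome := by
  rw [Bool.eq_iff_iff]
  simp [PySem.Dict.contains, PySem.Dict.get?, List.any_eq_true, List.find?_isSome]

lemma fixB_eq (t : List (List Int)) (stoi : List (String × Int)) (mg LK SK : Int)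
    (hL : PySem.Dict.get? (PySem.Dict.ofList stoi) "?" = some LK)
    (hS : PySem.Dict.get? (PySem.Dict.ofList stoi) "-" = some SK) :
    fix_lucky_blocks_alt t stoi mg =
      (PySem.List.pyRange 0 ((t.headD []).length : Int) 1).foldl
        (colStepB LK SK mg (t.length : Int)) t := by
  unfold fix_lucky_blocks_alt
  rw [dict_contains_eq_isSome, dict_contains_eq_isSome, hL, hS]
  simp only [Option.isSome_some, Bool.not_true, Bool.or_self, Option.getD_some, cols_eq]
  rw [if_neg (by simp)]
  rfl

lemma foldl_congr_inv {α β : Type} (P : β → Prop) (f f' : β → α → β) :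
    ∀ (l : List α) (b : β), P b →
      (∀ g c, c ∈ l → P g → f g c = f' g c ∧ P (f' g c)) →
      l.foldl f b = l.foldl f' b := by
  intro l
  induction l with
  | nil => intro b _ _; rfl
  | cons a l ih =>
    intro b hb h
    obtain ⟨he, hp⟩ := h b a (by simp) hb
    simp only [List.foldl_cons, he]
    exact ih (f' b a) hp (fun g c hc hg => h g c (by simp [hc]) hg)

lemma rev_split (L : List Int) (h : 1 ≤ L.length) :
    L.reverse = L.getD (L.length - 1) 0 :: (L.take (L.length - 1)).reverse := by
  have hm : L.length - 1 < L.length := by omega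
  have hsplit : L.drop (L.length - 1) = [L[L.length - 1]] := by
    rw [List.drop_eq_getElem_cons hm, show L.length - 1 + 1 = L.length by omega,
      List.drop_length]
  conv_lhs => rw [← List.take_length (l := L), show L.length = (L.length - 1) + 1 by omega]
  rw [List.take_add, hsplit, List.getD_eq_getElem _ _ hm, List.reverse_append]
  simp

-- the two column steps agree on any shape-preserved grid, and preserve the shape
lemma colStep_eq (t : List (List Int)) (LK SK mg : Int)
    (hPre : ∀ row ∈ t, (t.headD []).length ≤ row.length)
    (g : List (List Int)) (c : Int)
    (hc : c ∈ PySem.List.pyRange 0 ((t.headD []).length : Int) 1)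
    (hg1 : g.length = t.length)
    (hg2 : ∀ i' : Nat, (g.getD i' []).length = (t.getD i' []).length) :
    colStepA LK SK mg (t.length : Int) g c = colStepB LK SK mg (t.length : Int) g c ∧
    (colStepB LK SK mg (t.length : Int) g c).length = t.length ∧
    (∀ i' : Nat, ((colStepB LK SK mg (t.length : Int) g c).getD i' []).length
      = (t.getD i' []).length) := by
  obtain ⟨hc0, hcU⟩ := (PySem.List.mem_pyRange_one).1 hc
  set L := (PySem.List.pyRange 0 (t.length : Int) 1).filter (fun r => pvCell g r c == LK) with hLdef
  have hdesc : (PySem.List.pyRange ((t.length : Int) - 1) (-1) (-1)).filter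
      (fun r => pvCell g r c == LK) = L.reverse := by
    rw [ds_eq t.length, List.filter_reverse]
  have hLmem : ∀ r ∈ L, 0 ≤ r ∧ r < (t.length : Int) := by
    intro r hr
    exact (PySem.List.mem_pyRange_one).1 (List.mem_filter.1 hr).1
  have hp : L.Pairwise (· < ·) :=
    List.Pairwise.filter _ (PySem.List.pairwise_lt_pyRange_one 0 (t.length : Int))
  unfold colStepA colStepB
  rw [hdesc]
  simp only [← hLdef, List.length_reverse]
  by_cases hn : L.length < 2
  · rw [if_pos hn]
    have hJ : jumpLoop L mg c SK g ((L.length : Int) - 1) = g := by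
      unfold jumpLoop
      rw [show ((L.length : Int) - 1).toNat = 0 by omega]
      rfl
    rw [hJ]
    exact ⟨rfl, hg1, hg2⟩
  · rw [if_neg hn]
    have hn2 : 2 ≤ L.length := by omega
    have hrev := rev_split L (by omega)
    simp only [hrev]
    rw [A_fold mg c SK ((L.take (L.length - 1)).reverse) (L.getD (L.length - 1) 0) g]
    rw [jumpLoop_eq L mg c SK ((L.length : Int) - 1) g]
    have hbound : ∀ r ∈ jdl L mg ((L.length : Int) - 1),
        0 ≤ r ∧ r.toNat < g.length ∧ c.toNat < (g.getD r.toNat []).length := by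
      intro r hr
      have hmem := (mem_jdl L mg hp L.length ((L.length : Int) - 1) (by omega) (by push_cast; omega)
        (by push_cast; omega) r).1 hr
      have htn : ((L.length : Int) - 1).toNat = L.length - 1 := by omega
      rw [htn] at hmem
      have hrL : r ∈ L := by
        have := mem_of_mem_deadF mg _ _ _ hmem
        rw [List.mem_reverse] at this
        exact List.mem_of_mem_take this
      obtain ⟨h0, hlt⟩ := hLmem r hrL
      have hrN : r.toNat < t.length := by omega
      refine ⟨h0, by rw [hg1]; exact hrN, ?_⟩
      rw [hg2]
      have := rowlen_t t hPre r.toNat hrN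
      omega
    have heq : writeCol c SK (jdl L mg ((L.length : Int) - 1)) g
        = writeCol c SK (deadF mg (some (L.getD (L.length - 1) 0))
            ((L.take (L.length - 1)).reverse)) g := by
      apply writeCol_congr c hc0 SK _ _ g ?_ hbound
      intro x
      have hmem := mem_jdl L mg hp L.length ((L.length : Int) - 1) (by omega) (by push_cast; omega)
        (by push_cast; omega) x
      have htn : ((L.length : Int) - 1).toNat = L.length - 1 := by omega
      rw [htn] at hmem
      exact hmem
    refine ⟨heq.symm, ?_, ?_⟩
    · rw [length_writeCol, hg1]
    · intro i'; rw [rowlen_writeCol, hg2]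

-- ===== VERDICT (by name: the statement is the Claim_ definition above) =====
theorem fix_lucky_blocks_spec : Claim_equal_fix_lucky_blocks := by
  intro t stoi mg _hdom hpre
  unfold Spec_fix_lucky_blocks
  cases hL : PySem.Dict.get? (PySem.Dict.ofList stoi) "?" with
  | none =>
    have hA : fix_lucky_blocks t stoi mg = t := by
      unfold fix_lucky_blocks; rw [hL]
    have hB : fix_lucky_blocks_alt t stoi mg = t := by
      unfold fix_lucky_blocks_alt
      rw [dict_contains_eq_isSome, hL]
      rfl
    rw [hA, hB]
  | some LK =>
    cases hS : PySem.Dict.get? (PySem.Dict.ofList stoi) "-" with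
    | none =>
      have hA : fix_lucky_blocks t stoi mg = t := by
        unfold fix_lucky_blocks; rw [hL, hS]
      have hB : fix_lucky_blocks_alt t stoi mg = t := by
        unfold fix_lucky_blocks_alt
        rw [dict_contains_eq_isSome, dict_contains_eq_isSome, hL, hS]
        rfl
      rw [hA, hB]
    | some SK =>
      have hPre' : ∀ row ∈ t, (t.headD []).length ≤ row.length :=
        hpre ⟨by rw [hL]; rfl, by rw [hS]; rfl⟩
      rw [fixA_eq t stoi mg LK SK hL hS, fixB_eq t stoi mg LK SK hL hS]
      exact foldl_congr_inv
        (fun g => g.length = t.length ∧ ∀ i' : Nat, (g.getD i' []).length = (t.getD i' []).length)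
        (colStepA LK SK mg (t.length : Int)) (colStepB LK SK mg (t.length : Int))
        (PySem.List.pyRange 0 ((t.headD []).length : Int) 1) t ⟨rfl, fun _ => rfl⟩
        (fun g c hc hg => by
          obtain ⟨h1, h2, h3⟩ := colStep_eq t LK SK mg hPre' g c hc hg.1 hg.2
          exact ⟨h1, h2, h3⟩)
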